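-- pv_equiv track=rewrite | github.com/BmartOcho/Printssistant | even_odd_logic.py | generate_even_odd
-- ===== SOURCE A (Python) =====
-- def generate_even_odd(start: int, end: int, is_even: bool) -> str:
--     """
--     Generates a comma-separated string of even or odd numbers within a given range.
--     """
--     numbers_list = []
--
--     # Ensure start is always less than or equal to end for the range to work
--     step = 1 if start <= end else -1
--     range_end = end + 1 if start <= end else end - 1
--
--     for number in range(start, range_end, step):
--         if is_even and number % 2 == 0:
--             numbers_list.append(str(number))
--         elif not is_even and number % 2 != 0:
--             numbers_list.append(str(number))
--
--     return ", ".join(numbers_list)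
-- ===== SOURCE B (Python) =====
-- def generate_even_odd(start: int, end: int, is_even: bool) -> str:
--     """Same output as A: skip to the first number of the wanted parity, then step by 2."""
--     matches = (start % 2 == 0) == is_even
--     parts = []
--     if start <= end:
--         n = start if matches else start + 1
--         while n <= end:
--             parts.append(str(n))
--             n += 2
--     else:
--         n = start if matches else start - 1
--         while n >= end:
--             parts.append(str(n))
--             n -= 2
--     return ", ".join(parts)
-- ===== Notes on version B (the rewrite author's own statement) =====
-- stated objective: simpler
-- what changed: Instead of scanning every integer in the range and testing parity, B jumps to the first number of the requested parity and steps by 2 with no test inside the loop.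
import Mathlib
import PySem

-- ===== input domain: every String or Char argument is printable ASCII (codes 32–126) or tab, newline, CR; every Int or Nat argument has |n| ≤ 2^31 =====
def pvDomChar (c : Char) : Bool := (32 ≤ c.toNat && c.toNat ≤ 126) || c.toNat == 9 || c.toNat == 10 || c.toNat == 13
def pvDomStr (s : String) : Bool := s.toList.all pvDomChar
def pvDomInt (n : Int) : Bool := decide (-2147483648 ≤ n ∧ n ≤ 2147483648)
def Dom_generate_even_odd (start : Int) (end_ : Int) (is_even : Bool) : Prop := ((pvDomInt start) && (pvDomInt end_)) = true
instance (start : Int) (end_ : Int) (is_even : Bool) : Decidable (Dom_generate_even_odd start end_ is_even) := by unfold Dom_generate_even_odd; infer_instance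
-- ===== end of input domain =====

-- B skips directly to the first number of the requested parity and steps by 2, with no parity test in the loop (objective: simpler).

-- ===== PORT A =====
def generate_even_odd (start : Int) (end_ : Int) (is_even : Bool) : String :=
  let step : Int := if start ≤ end_ then 1 else -1
  let range_end : Int := if start ≤ end_ then end_ + 1 else end_ - 1
  let numbers_list : List String :=
    (PySem.List.pyRange start range_end step).foldl
      (fun acc number =>
        if is_even && (PySem.Int.mod number 2 == 0) then acc ++ [PySem.Int.toStr number]
        else if !is_even && !(PySem.Int.mod number 2 == 0) then acc ++ [PySem.Int.toStr number]
        else acc) []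
  PySem.Str.join ", " numbers_list

-- ===== PORT B =====
-- ascending while-loop of Source B: collect str(n), n += 2, while n ≤ end
def pvUpStrs (n : Int) (end_ : Int) : List String :=
  if n ≤ end_ then PySem.Int.toStr n :: pvUpStrs (n + 2) end_ else []
termination_by (end_ + 2 - n).toNat
decreasing_by omega

-- descending while-loop of Source B: collect str(n), n -= 2, while n ≥ end
def pvDownStrs (n : Int) (end_ : Int) : List String :=
  if end_ ≤ n then PySem.Int.toStr n :: pvDownStrs (n - 2) end_ else []
termination_by (n + 2 - end_).toNat
decreasing_by omega

def generate_even_odd_alt (start : Int) (end_ : Int) (is_even : Bool) : String :=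
  let start_matches : Bool := (PySem.Int.mod start 2 == 0) == is_even
  let parts : List String :=
    if start ≤ end_ then pvUpStrs (if start_matches then start else start + 1) end_
    else pvDownStrs (if start_matches then start else start - 1) end_
  PySem.Str.join ", " parts

-- ===== PRECONDITION & SPEC =====
def Spec_generate_even_odd (start : Int) (end_ : Int) (is_even : Bool) (out : String) : Prop := out = generate_even_odd_alt start end_ is_even
instance (start : Int) (end_ : Int) (is_even : Bool) (out : String) : Decidable (Spec_generate_even_odd start end_ is_even out) := by unfold Spec_generate_even_odd; infer_instance

-- ===== CLAIM (what is proved, stated in full; the proofs are below) =====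
def Claim_equal_generate_even_odd : Prop := ∀ (start : Int) (end_ : Int) (is_even : Bool), Dom_generate_even_odd start end_ is_even → Spec_generate_even_odd start end_ is_even (generate_even_odd start end_ is_even)

-- ===== LEMMAS AND PROOFS =====

-- the parity test A performs, as one predicate
def pvP (is_even : Bool) (n : Int) : Bool := (PySem.Int.mod n 2 == 0) == is_even

lemma pvP_succ (is_even : Bool) (n : Int) : pvP is_even (n + 1) = !pvP is_even n := by
  unfold pvP
  rw [PySem.Int.mod_eq_emod_of_pos (by norm_num), PySem.Int.mod_eq_emod_of_pos (by norm_num)]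
  rcases Int.emod_two_eq n with h | h
  · have h1 : (n + 1) % 2 = 1 := by omega
    cases is_even <;> simp [h, h1]
  · have h1 : (n + 1) % 2 = 0 := by omega
    cases is_even <;> simp [h, h1]

lemma pvP_pred (is_even : Bool) (n : Int) : pvP is_even (n - 1) = !pvP is_even n := by
  have h := pvP_succ is_even (n - 1)
  rw [sub_add_cancel] at h
  cases ha : pvP is_even (n - 1) <;> rw [ha] at h <;> simp [← h]

lemma pv_up (is_even : Bool) : ∀ (k : Nat) (a b : Int), (b + 1 - a).toNat = k →
    ((PySem.List.pyRange a (b + 1) 1).filter (pvP is_even)).map PySem.Int.toStr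
      = pvUpStrs (if pvP is_even a then a else a + 1) b := by
  intro k
  induction k with
  | zero =>
    intro a b hk
    rw [PySem.List.pyRange_one_eq_nil (by omega)]
    rw [pvUpStrs, pvUpStrs]
    split <;> simp <;> omega
  | succ m ih =>
    intro a b hk
    have hab : a ≤ b := by omega
    rw [PySem.List.pyRange_one_cons (by omega), List.filter_cons]
    have ih' := ih (a + 1) b (by omega)
    rw [pvP_succ] at ih'
    cases hp : pvP is_even a
    · rw [hp] at ih'
      simp only [Bool.not_false, if_pos] at ih'
      simp only [Bool.false_eq_true, ite_false]
      exact ih'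
    · rw [hp] at ih'
      simp only [Bool.not_true, Bool.false_eq_true, ite_false] at ih'
      simp only [if_pos, List.map_cons]
      rw [ih', show a + 1 + 1 = a + 2 from by ring]
      conv_rhs => rw [pvUpStrs]
      rw [if_pos hab]

lemma pv_down (is_even : Bool) : ∀ (k : Nat) (a b : Int), (a - (b - 1)).toNat = k →
    ((PySem.List.pyRange a (b - 1) (-1)).filter (pvP is_even)).map PySem.Int.toStr
      = pvDownStrs (if pvP is_even a then a else a - 1) b := by
  intro k
  induction k with
  | zero =>
    intro a b hk
    rw [PySem.List.pyRange_neg_one_eq_nil (by omega)]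
    rw [pvDownStrs, pvDownStrs]
    split <;> simp <;> omega
  | succ m ih =>
    intro a b hk
    have hab : b ≤ a := by omega
    rw [PySem.List.pyRange_neg_one_cons (by omega), List.filter_cons]
    have ih' := ih (a - 1) b (by omega)
    rw [pvP_pred] at ih'
    cases hp : pvP is_even a
    · rw [hp] at ih'
      simp only [Bool.not_false, if_pos] at ih'
      simp only [Bool.false_eq_true, ite_false]
      exact ih'
    · rw [hp] at ih'
      simp only [Bool.not_true, Bool.false_eq_true, ite_false] at ih'
      simp only [if_pos, List.map_cons]
      rw [ih', show a - 1 - 1 = a - 2 from by ring]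
      conv_rhs => rw [pvDownStrs]
      rw [if_pos hab]

lemma pv_bodyEq (is_even : Bool) :
    (fun (acc : List String) (number : Int) =>
        if is_even && (PySem.Int.mod number 2 == 0) then acc ++ [PySem.Int.toStr number]
        else if !is_even && !(PySem.Int.mod number 2 == 0) then acc ++ [PySem.Int.toStr number]
        else acc)
    = fun acc number => if pvP is_even number then acc ++ [PySem.Int.toStr number] else acc := by
  funext acc number
  unfold pvP
  cases is_even <;> cases h : (PySem.Int.mod number 2 == 0) <;> simp [h]

-- ===== VERDICT (by name: the statement is the Claim_ definition above) =====
theorem generate_even_odd_spec : Claim_equal_generate_even_odd := by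
  intro start end_ is_even _
  unfold Spec_generate_even_odd generate_even_odd generate_even_odd_alt
  by_cases h : start ≤ end_ <;>
    simp only [h, ite_true, ite_false, pv_bodyEq, PySem.List.foldl_append_if]
  · rw [List.nil_append, pv_up is_even (end_ + 1 - start).toNat start end_ rfl]
    rfl
  · rw [List.nil_append, pv_down is_even (start - (end_ - 1)).toNat start end_ rfl]
    rfl
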